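-- pv_equiv track=rewrite | github.com/paneslav/SoftUni-Python | Python/Python Advanced/Advanced/Workshop/02_tic_tac_toe.py | assign_board_positions
-- ===== SOURCE A (Python) =====
-- def assign_board_positions(board):
--     positions = {}
--     start = 1
--     for row in range(len(board[0])):
--         for col in range(len(board[0])):
--             positions[start] = (row, col)
--             start += 1
--
--     return positions
-- ===== SOURCE B (Python) =====
-- def assign_board_positions(board):
--     n = len(board[0])
--     items = []
--     key = n * n
--     row = n - 1
--     col = n - 1
--     while key >= 1:
--         items.append((key, (row, col)))
--         key -= 1
--         if col:
--             col -= 1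
--         else:
--             col = n - 1
--             row -= 1
--     items.reverse()
--     return dict(items)
-- ===== Notes on version B (the rewrite author's own statement) =====
-- stated objective: alternative
-- what changed: Instead of two nested row/col loops with a running counter, B builds the items back-to-front from key n*n down to 1, tracking (row, col) by decrementing counters with a column wrap (no nested loops, no division), then reverses the list and builds the dict from it.
-- outside the precondition, e.g. on assign_board_positions([]): A raises IndexError, B raises IndexError
import Mathlib
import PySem

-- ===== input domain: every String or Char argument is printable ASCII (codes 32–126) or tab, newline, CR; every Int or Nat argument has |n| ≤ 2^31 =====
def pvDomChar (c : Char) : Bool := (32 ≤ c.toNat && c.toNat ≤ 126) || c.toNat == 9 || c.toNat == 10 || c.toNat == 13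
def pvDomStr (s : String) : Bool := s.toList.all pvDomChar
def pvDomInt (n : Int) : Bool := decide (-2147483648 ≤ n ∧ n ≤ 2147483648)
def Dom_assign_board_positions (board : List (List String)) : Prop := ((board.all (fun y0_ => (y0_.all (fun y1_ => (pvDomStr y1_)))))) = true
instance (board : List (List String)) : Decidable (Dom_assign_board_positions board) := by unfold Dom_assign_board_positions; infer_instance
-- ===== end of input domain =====

-- B replaces A's two nested loops with a counter by a single backward pass from key n*n down to 1
-- that tracks (row, col) by decrementing counters with a column wrap, then reverses (alternative decomposition, same cost).

-- ===== PORT A =====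
def assign_board_positions (board : List (List String)) : List (Int × Int × Int) :=
  let n : Int := ((board.headD []).length : Int)
  let res :=
    (PySem.List.pyRange 0 n 1).foldl
      (fun (st : PySem.Dict Int (Int × Int) × Int) row =>
        (PySem.List.pyRange 0 n 1).foldl
          (fun st col => (st.1.insert st.2 (row, col), st.2 + 1)) st)
      (PySem.Dict.empty, 1)
  res.1.items

-- ===== PORT B =====
-- the while loop: fuel = current key value (it decreases by exactly 1 each iteration until key < 1)
def pvLoopB (n : Int) : Nat → Int → Int → List (Int × Int × Int) → List (Int × Int × Int)
  | 0, _, _, acc => acc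
  | (k+1), row, col, acc =>
      let acc' := acc ++ [(((k : Nat) : Int) + 1, row, col)]
      if col ≠ 0 then pvLoopB n k row (col - 1) acc'
      else pvLoopB n k (row - 1) (n - 1) acc'

def assign_board_positions_alt (board : List (List String)) : List (Int × Int × Int) :=
  let n : Nat := (board.headD []).length
  let items := pvLoopB (n : Int) (n * n) ((n : Int) - 1) ((n : Int) - 1) []
  -- items.reverse(); dict(items)
  ((items.reverse).foldl (fun (d : PySem.Dict Int (Int × Int)) p => d.insert p.1 p.2) PySem.Dict.empty).items

-- ===== PRECONDITION & SPEC =====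
-- A evaluates board[0]: on the empty board it raises IndexError, so Pre_ excludes board = [].
def Pre_assign_board_positions (board : List (List String)) : Prop := board ≠ []
instance (board : List (List String)) : Decidable (Pre_assign_board_positions board) := by unfold Pre_assign_board_positions; infer_instance
def pvWitness_assign_board_positions : List (List String) := [["x"]]

def Spec_assign_board_positions (board : List (List String)) (out : List (Int × Int × Int)) : Prop := out = assign_board_positions_alt board
instance (board : List (List String)) (out : List (Int × Int × Int)) : Decidable (Spec_assign_board_positions board out) := by unfold Spec_assign_board_positions; infer_instance

-- ===== CLAIM (what is proved, stated in full; the proofs are below) =====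
def Claim_equal_assign_board_positions : Prop := ∀ (board : List (List String)), Dom_assign_board_positions board → Pre_assign_board_positions board → Spec_assign_board_positions board (assign_board_positions board)

-- ===== LEMMAS AND PROOFS =====

-- the canonical items list both programs produce
def pvItems (n : Nat) : List (Int × Int × Int) :=
  (List.range (n * n)).map (fun (i : Nat) => ((i : Int) + 1, ((i / n : Nat) : Int), ((i % n : Nat) : Int)))

-- inner loop of A: over fresh increasing keys the dict simply appends and the counter advances by the length
lemma pv_inner (row : Int) (m : Nat) : ∀ (d : PySem.Dict Int (Int × Int)) (s : Int),
    (∀ p ∈ d.items, p.1 < s) →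
    (PySem.List.pyRange 0 (m : Int) 1).foldl
        (fun (st : PySem.Dict Int (Int × Int) × Int) col => (st.1.insert st.2 (row, col), st.2 + 1)) (d, s)
      = (PySem.Dict.mk (d.items ++ (List.range m).map (fun (c : Nat) => (s + (c : Int), row, (c : Int)))), s + m) := by
  induction m with
  | zero =>
    intro d s _
    simp [PySem.List.pyRange_one_eq_nil]
  | succ m ih =>
    intro d s h
    have hc : ((m + 1 : Nat) : Int) = (m : Int) + 1 := by push_cast; ring
    rw [hc, PySem.List.pyRange_one_succ_right (by positivity), List.foldl_append, ih d s h]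
    simp only [List.foldl_cons, List.foldl_nil]
    have hfresh : (PySem.Dict.mk (d.items ++ (List.range m).map (fun (c : Nat) => (s + (c : Int), row, (c : Int))))).contains (s + (m : Int)) = false := by
      rw [PySem.Dict.contains_eq_decide_mem_keys]
      simp only [decide_eq_false_iff_not, PySem.Dict.keys_mk, List.map_append, List.mem_append, not_or]
      constructor
      · intro hk
        obtain ⟨p, hp, hpk⟩ := List.mem_map.mp hk
        have := h p hp
        omega
      · intro hk
        obtain ⟨q, hq, hqk⟩ := List.mem_map.mp hk
        obtain ⟨c, hcm, rfl⟩ := List.mem_map.mp hq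
        simp only [List.mem_range] at hcm
        have hqk' : s + (c : Int) = s + (m : Int) := hqk
        omega
    refine Prod.ext ?_ (by push_cast; ring)
    apply PySem.Dict.ext
    rw [PySem.Dict.items_insert_of_not_contains _ _ hfresh]
    show d.items ++ _ ++ [(s + (m : Int), row, (m : Int))] = _
    rw [List.range_succ, List.map_append, List.append_assoc]
    rfl

-- outer loop of A in closed form
lemma pv_outer (n : Nat) (r : Nat) (hr : r ≤ n) :
    (PySem.List.pyRange 0 (r : Int) 1).foldl
        (fun (st : PySem.Dict Int (Int × Int) × Int) row =>
          (PySem.List.pyRange 0 (n : Int) 1).foldl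
            (fun st col => (st.1.insert st.2 (row, col), st.2 + 1)) st)
        (PySem.Dict.empty, 1)
      = (PySem.Dict.mk ((List.range (r * n)).map
            (fun (i : Nat) => ((i : Int) + 1, ((i / n : Nat) : Int), ((i % n : Nat) : Int)))),
          (1 : Int) + ((r * n : Nat) : Int)) := by
  induction r with
  | zero =>
    simp [PySem.List.pyRange_one_eq_nil]
    rfl
  | succ r ih =>
    have hrn : r ≤ n := Nat.le_of_succ_le hr
    have hc : ((r + 1 : Nat) : Int) = (r : Int) + 1 := by push_cast; ring
    rw [hc, PySem.List.pyRange_one_succ_right (by positivity), List.foldl_append, ih hrn]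
    simp only [List.foldl_cons, List.foldl_nil]
    rw [pv_inner (r : Int) n _ _ (by
      intro p hp
      obtain ⟨i, hi, rfl⟩ := List.mem_map.mp hp
      simp only [List.mem_range] at hi
      show (i : Int) + 1 < 1 + ((r * n : Nat) : Int)
      push_cast
      omega)]
    refine Prod.ext ?_ (by push_cast; ring)
    apply PySem.Dict.ext
    show (List.range (r * n)).map (fun (i : Nat) => ((i : Int) + 1, ((i / n : Nat) : Int), ((i % n : Nat) : Int)))
        ++ (List.range n).map (fun (c : Nat) => ((1 : Int) + ((r * n : Nat) : Int) + (c : Int), (r : Int), (c : Int)))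
      = (List.range ((r + 1) * n)).map (fun (i : Nat) => ((i : Int) + 1, ((i / n : Nat) : Int), ((i % n : Nat) : Int)))
    rw [show (r + 1) * n = r * n + n by ring, List.range_add, List.map_append, List.map_map]
    congr 1
    refine List.map_congr_left ?_
    intro c hcm
    simp only [List.mem_range] at hcm
    have hn : 0 < n := Nat.lt_of_le_of_lt (Nat.zero_le c) hcm
    simp only [Function.comp]
    have hdiv : (r * n + c) / n = r := by
      rw [Nat.add_comm, Nat.mul_comm, Nat.add_mul_div_left _ _ hn, Nat.div_eq_of_lt hcm]
      omega
    have hmod : (r * n + c) % n = c := by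
      rw [Nat.add_comm, Nat.mul_comm, Nat.add_mul_mod_self_left, Nat.mod_eq_of_lt hcm]
    rw [hdiv, hmod]
    refine Prod.ext ?_ rfl
    show (1 : Int) + ((r * n : Nat) : Int) + (c : Int) = ((r * n + c : Nat) : Int) + 1
    push_cast
    ring

-- A's dict has exactly pvItems as its items
lemma pv_A_eq (board : List (List String)) :
    assign_board_positions board = pvItems (board.headD []).length := by
  unfold assign_board_positions pvItems
  set n : Nat := (board.headD []).length with hn
  simp only []
  rw [pv_outer n n le_rfl]

-- one-step unfolding of the while loop (used by the proofs below)
lemma pvLoopB_succ (n : Int) (k : Nat) (row col : Int) (acc : List (Int × Int × Int)) :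
    pvLoopB n (k + 1) row col acc
      = if col ≠ 0 then pvLoopB n k row (col - 1) (acc ++ [(((k : Nat) : Int) + 1, row, col)])
        else pvLoopB n k (row - 1) (n - 1) (acc ++ [(((k : Nat) : Int) + 1, row, col)]) := rfl

-- B's backward loop: when started at fuel m+1 with the correct coordinates of key m+1,
-- it appends the keys m+1 down to 1 with their row-major coordinates
lemma pv_loopB (n : Nat) (hn : 0 < n) : ∀ (m : Nat) (acc : List (Int × Int × Int)),
    pvLoopB (n : Int) (m + 1) ((m / n : Nat) : Int) ((m % n : Nat) : Int) acc
      = acc ++ ((List.range (m + 1)).reverse.map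
          (fun (i : Nat) => ((i : Int) + 1, ((i / n : Nat) : Int), ((i % n : Nat) : Int)))) := by
  intro m
  induction m with
  | zero =>
    intro acc
    have h0 : (0 : Nat) / n = 0 := Nat.zero_div n
    have h1 : (0 : Nat) % n = 0 := Nat.zero_mod n
    simp [pvLoopB, h0, h1]
  | succ m ih =>
    intro acc
    set q := m / n with hq
    set r := m % n with hr
    have hmd : n * q + r = m := Nat.div_add_mod m n
    have hrlt : r < n := Nat.mod_lt _ hn
    have hrev : (List.range (m + 1 + 1)).reverse
        = (m + 1) :: (List.range (m + 1)).reverse := by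
      rw [List.range_succ, List.reverse_append]
      rfl
    by_cases hcase : r + 1 < n
    · -- no wrap: (m+1)/n = q, (m+1)%n = r+1
      have hdiv : (m + 1) / n = q := by
        rw [show m + 1 = (r + 1) + n * q by omega, Nat.add_mul_div_left _ _ hn,
          Nat.div_eq_of_lt hcase]
        omega
      have hmod : (m + 1) % n = r + 1 := by
        rw [show m + 1 = (r + 1) + n * q by omega, Nat.add_mul_mod_self_left,
          Nat.mod_eq_of_lt hcase]
      rw [hdiv, hmod, pvLoopB_succ]
      rw [if_pos (by push_cast; omega)]
      have hcol : ((r + 1 : Nat) : Int) - 1 = ((r : Nat) : Int) := by push_cast; ring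
      rw [hcol, ih]
      rw [hrev]
      simp [List.append_assoc]
      refine ⟨?_, ?_⟩
      · rw [show ((m : Int) + 1) = ((m + 1 : Nat) : Int) by push_cast; ring, ← Int.natCast_div, hdiv]
      · rw [show ((m : Int) + 1) = ((m + 1 : Nat) : Int) by push_cast; ring, ← Int.natCast_mod, hmod]
        push_cast
        ring
    · -- wrap: r + 1 = n, so (m+1)/n = q+1, (m+1)%n = 0
      have hrn : r + 1 = n := by omega
      have hmul : n * (q + 1) = n * q + n := by ring
      have hdiv : (m + 1) / n = q + 1 := by
        rw [show m + 1 = n * (q + 1) by omega, Nat.mul_div_cancel_left _ hn]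
      have hmod : (m + 1) % n = 0 := by
        rw [show m + 1 = n * (q + 1) by omega, Nat.mul_mod_right]
      rw [hdiv, hmod, pvLoopB_succ]
      rw [if_neg (by simp)]
      have hrow : ((q + 1 : Nat) : Int) - 1 = ((q : Nat) : Int) := by push_cast; ring
      have hcol : ((n : Nat) : Int) - 1 = ((r : Nat) : Int) := by omega
      rw [hrow, hcol, ih]
      rw [hrev]
      simp [List.append_assoc]
      refine ⟨?_, ?_⟩
      · rw [show ((m : Int) + 1) = ((m + 1 : Nat) : Int) by push_cast; ring, ← Int.natCast_div, hdiv]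
        push_cast
        ring
      · rw [show ((m : Int) + 1) = ((m + 1 : Nat) : Int) by push_cast; ring, ← Int.natCast_mod, hmod]
        simp

-- building a dict by inserting pvItems (fresh distinct keys) just collects the list
lemma pv_fold_items (n : Nat) :
    ((pvItems n).foldl (fun (d : PySem.Dict Int (Int × Int)) p => d.insert p.1 p.2)
        PySem.Dict.empty).items = pvItems n := by
  have h := PySem.Dict.items_foldl_insert_fresh (l := pvItems n)
    (k := fun p => p.1) (v := fun p => p.2) (d := PySem.Dict.empty)
    (by intro a _; exact PySem.Dict.contains_empty _)
    (by
      unfold pvItems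
      rw [List.map_map]
      have : ((fun (p : Int × Int × Int) => p.1) ∘
          (fun (i : Nat) => ((i : Int) + 1, ((i / n : Nat) : Int), ((i % n : Nat) : Int))))
          = fun (i : Nat) => (i : Int) + 1 := rfl
      rw [this]
      refine List.Nodup.map ?_ (List.nodup_range)
      intro a b hab
      simp only [add_left_inj, Nat.cast_inj] at hab
      exact hab)
  simpa using h

lemma pv_B_items (n : Nat) :
    ((pvLoopB (n : Int) (n * n) ((n : Int) - 1) ((n : Int) - 1) []).reverse.foldl
        (fun (d : PySem.Dict Int (Int × Int)) p => d.insert p.1 p.2) PySem.Dict.empty).items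
      = pvItems n := by
  rcases Nat.eq_zero_or_pos n with h0 | hpos
  · subst h0
    simp [pvLoopB, pvItems]
    rfl
  · have hm : n * n = (n * n - 1) + 1 := by
      have h1 : 1 ≤ n * n := Nat.one_le_iff_ne_zero.mpr (by positivity)
      omega
    set m := n * n - 1 with hmdef
    have hsplit : m = (n - 1) + n * (n - 1) := by
      cases n with
      | zero => omega
      | succ k =>
        have h0 : k + 1 - 1 = k := rfl
        rw [h0]
        have h1 : (k + 1) * (k + 1) = k * k + k + k + 1 := by ring
        have h2 : (k + 1) * k = k * k + k := by ring
        omega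
    have hdiv : m / n = n - 1 := by
      rw [hsplit, Nat.add_mul_div_left _ _ hpos, Nat.div_eq_of_lt (by omega)]
      omega
    have hmod : m % n = n - 1 := by
      rw [hsplit, Nat.add_mul_mod_self_left, Nat.mod_eq_of_lt (by omega)]
    have hl := pv_loopB n hpos m []
    rw [hdiv, hmod] at hl
    have hrow : ((n : Nat) : Int) - 1 = ((n - 1 : Nat) : Int) := by omega
    rw [hm, hrow, hl]
    rw [List.nil_append, List.map_reverse, List.reverse_reverse]
    have hmap : (List.range (m + 1)).map
        (fun (i : Nat) => ((i : Int) + 1, ((i / n : Nat) : Int), ((i % n : Nat) : Int))) = pvItems n := by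
      unfold pvItems
      rw [← hm]
    rw [hmap, pv_fold_items]

lemma pv_B_eq (board : List (List String)) :
    assign_board_positions_alt board = pvItems (board.headD []).length := by
  unfold assign_board_positions_alt
  exact pv_B_items _

-- ===== VERDICT (by name: the statement is the Claim_ definition above) =====
theorem assign_board_positions_spec : Claim_equal_assign_board_positions := by
  intro board _ _
  unfold Spec_assign_board_positions
  rw [pv_A_eq, pv_B_eq]
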